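-- pv_equiv track=rewrite | github.com/Bobcatsoap/jy-server | cell/RoomType6PassiveFindCards.py | dui_zi_arrangement
-- ===== SOURCE A (Python) =====
-- import copy
--
-- def dui_zi_arrangement(cards, count, duizi, duizis):
--     count -= 1
--     if count == -1:
--         duizis.append(duizi)
--         return duizi
--     for i in cards:
--         new_cards = copy.deepcopy(cards)
--         new_duizi = copy.deepcopy(duizi)
--         new_duizi.extend(i)
--         new_cards.remove(i)
--         dui_zi_arrangement(copy.deepcopy(new_cards), count, copy.deepcopy(new_duizi), duizis)
--
--     return duizis
-- ===== SOURCE B (Python) =====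
-- def _without(rem, i):
--     r2 = list(rem)
--     r2.remove(i)
--     return r2
--
--
-- def dui_zi_arrangement(cards, count, duizi, duizis):
--     if 0 <= count <= len(cards):
--         frontier = [(list(cards), list(duizi))]
--         for _ in range(count):
--             frontier = [(_without(rem, i), part + i)
--                         for rem, part in frontier for i in rem]
--         duizis.extend(part for _, part in frontier)
--     return duizis
-- ===== Notes on version B (the rewrite author's own statement) =====
-- stated objective: alternative
-- what changed: Replaces the deepcopy-heavy recursive DFS with an iterative breadth-first frontier: the frontier of (remaining, partial) pairs is expanded exactly count times by a comprehension and the final partials are appended at once; no recursion, no deepcopy.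
-- outside the precondition, e.g. on dui_zi_arrangement([[1]], 0, [], []): A returns [], B returns [[]]
import Mathlib
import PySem

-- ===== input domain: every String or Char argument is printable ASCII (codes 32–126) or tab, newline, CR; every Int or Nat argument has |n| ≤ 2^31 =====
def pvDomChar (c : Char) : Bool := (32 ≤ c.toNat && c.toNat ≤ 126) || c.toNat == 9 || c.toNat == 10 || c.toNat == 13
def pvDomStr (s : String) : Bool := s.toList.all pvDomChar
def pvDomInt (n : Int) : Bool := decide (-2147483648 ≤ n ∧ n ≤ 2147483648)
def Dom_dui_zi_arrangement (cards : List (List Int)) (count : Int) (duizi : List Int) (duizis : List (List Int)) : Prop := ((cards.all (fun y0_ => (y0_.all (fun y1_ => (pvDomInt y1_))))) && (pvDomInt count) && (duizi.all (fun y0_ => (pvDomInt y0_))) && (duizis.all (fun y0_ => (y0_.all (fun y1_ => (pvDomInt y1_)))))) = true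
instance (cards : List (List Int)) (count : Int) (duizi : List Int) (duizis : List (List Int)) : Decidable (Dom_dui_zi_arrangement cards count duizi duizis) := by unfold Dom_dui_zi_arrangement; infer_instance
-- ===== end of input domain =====

-- B replaces the deepcopy-heavy recursive DFS with an iterative breadth-first frontier expanded
-- exactly `count` times (alternative decomposition). Equivalence is about the RETURN value only:
-- Python A and B both mutate `duizis` in place (B appends the same elements when count ≠ 0).


-- ===== PORT A =====
-- Literal port of the recursive DFS.  The recursion depth is bounded by cards.length + 1 (each
-- recursive call removes one element of cards), so a fuel parameter set to cards.length + 1 makes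
-- the same computation total; the fuel-0 branch is never reached.
-- `new_cards.remove(i)` (first occurrence, i ∈ cards always) is List.erase.
def pvDfsA : Nat → List (List Int) → Int → List Int → List (List Int) → List (List Int)
  | 0, _, _, _, duizis => duizis
  | fuel + 1, cards, count, duizi, duizis =>
    let count := count - 1
    if count = -1 then
      duizis ++ [duizi]            -- duizis.append(duizi); the Python returns duizi here (outside Pre_)
    else
      cards.foldl (fun acc i =>
        pvDfsA fuel (cards.erase i) count (duizi ++ i) acc) duizis

def dui_zi_arrangement (cards : List (List Int)) (count : Int) (duizi : List Int) (duizis : List (List Int)) : List (List Int) :=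
  pvDfsA (cards.length + 1) cards count duizi duizis

-- ===== PORT B =====
-- _without(rem, i): copy rem and remove i's first occurrence (i ∈ rem always).
def pvWithout (rem : List (List Int)) (i : List Int) : List (List Int) := rem.erase i

-- one frontier-expansion comprehension, iterated count times
def pvStep (f : List (List (List Int) × List Int)) : List (List (List Int) × List Int) :=
  f.flatMap (fun p => p.1.map (fun i => (pvWithout p.1 i, p.2 ++ i)))

def pvIter : Nat → List (List (List Int) × List Int) → List (List (List Int) × List Int)
  | 0, f => f
  | n + 1, f => pvIter n (pvStep f)

def dui_zi_arrangement_alt (cards : List (List Int)) (count : Int) (duizi : List Int) (duizis : List (List Int)) : List (List Int) :=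
  if 0 ≤ count ∧ count ≤ (cards.length : Int) then
    duizis ++ (pvIter count.toNat [(cards, duizi)]).map Prod.snd
  else
    duizis

-- ===== PRECONDITION & SPEC =====
-- Pre_ excludes count = 0, where A returns `duizi` — a flat list of ints, not a value of the
-- declared list-of-lists return type (B naturally returns duizis with duizi appended there).
def Pre_dui_zi_arrangement (cards : List (List Int)) (count : Int) (duizi : List Int) (duizis : List (List Int)) : Prop := count ≠ 0
instance (cards : List (List Int)) (count : Int) (duizi : List Int) (duizis : List (List Int)) : Decidable (Pre_dui_zi_arrangement cards count duizi duizis) := by unfold Pre_dui_zi_arrangement; infer_instance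

def pvWitness_dui_zi_arrangement : List (List Int) × Int × List Int × List (List Int) := ([[1], [2, 3]], 2, [9], [])

def Spec_dui_zi_arrangement (cards : List (List Int)) (count : Int) (duizi : List Int) (duizis : List (List Int)) (out : List (List Int)) : Prop := out = dui_zi_arrangement_alt cards count duizi duizis
instance (cards : List (List Int)) (count : Int) (duizi : List Int) (duizis : List (List Int)) (out : List (List Int)) : Decidable (Spec_dui_zi_arrangement cards count duizi duizis out) := by unfold Spec_dui_zi_arrangement; infer_instance

-- ===== CLAIM (what is proved, stated in full; the proofs are below) =====
def Claim_equal_dui_zi_arrangement : Prop := ∀ (cards : List (List Int)) (count : Int) (duizi : List Int) (duizis : List (List Int)), Dom_dui_zi_arrangement cards count duizi duizis → Pre_dui_zi_arrangement cards count duizi duizis → Spec_dui_zi_arrangement cards count duizi duizis (dui_zi_arrangement cards count duizi duizis)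

-- ===== LEMMAS AND PROOFS =====

-- the mathematical object both programs compute: DFS leaves at depth n
def pvDfs : Nat → List (List Int) → List Int → List (List Int)
  | 0, _, duizi => [duizi]
  | n + 1, cards, duizi => cards.flatMap (fun i => pvDfs n (cards.erase i) (duizi ++ i))

-- negative count: A appends nothing
theorem pvDfsA_neg (fuel : Nat) : ∀ (cards : List (List Int)) (count : Int) (duizi : List Int)
    (duizis : List (List Int)), count < 0 → pvDfsA fuel cards count duizi duizis = duizis := by
  induction fuel with
  | zero => intro cards count duizi duizis _; rfl
  | succ f ih =>
    intro cards count duizi duizis hneg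
    have h1 : ¬ (count - 1 = -1) := by omega
    simp only [pvDfsA, h1, if_false]
    have : ∀ (acc : List (List Int)) (i : List Int), i ∈ cards →
        pvDfsA f (cards.erase i) (count - 1) (duizi ++ i) acc = acc := by
      intro acc i _; exact ih _ _ _ _ (by omega)
    rw [PySem.List.foldl_congr_mem _ _ (fun acc _ => acc) _ this]
    exact List.foldl_fixed _

-- nonnegative count, enough fuel: A computes the DFS leaves
theorem pvDfsA_eq (fuel : Nat) : ∀ (cards : List (List Int)) (count : Int) (duizi : List Int)
    (duizis : List (List Int)), 0 ≤ count → cards.length < fuel →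
    pvDfsA fuel cards count duizi duizis = duizis ++ pvDfs count.toNat cards duizi := by
  induction fuel with
  | zero => intro cards count duizi duizis _ h; omega
  | succ f ih =>
    intro cards count duizi duizis hc hlen
    by_cases h0 : count = 0
    · subst h0; simp [pvDfsA, pvDfs]
    · have h1 : ¬ (count - 1 = -1) := by omega
      simp only [pvDfsA, h1, if_false]
      have hstep : ∀ (acc : List (List Int)) (i : List Int), i ∈ cards →
          pvDfsA f (cards.erase i) (count - 1) (duizi ++ i) acc
            = acc ++ pvDfs (count - 1).toNat (cards.erase i) (duizi ++ i) := by
        intro acc i hi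
        have hpos : 0 < cards.length := List.length_pos_of_mem hi
        have hl : (cards.erase i).length < f := by
          have := List.length_erase_of_mem hi
          omega
        exact ih _ _ _ _ (by omega) hl
      rw [PySem.List.foldl_congr_mem _ _
            (fun acc i => acc ++ pvDfs (count - 1).toNat (cards.erase i) (duizi ++ i)) _ hstep,
          PySem.List.foldl_append_eq_flatMap]
      have hn : count.toNat = (count - 1).toNat + 1 := by omega
      rw [hn]
      rfl

-- BFS frontier after n steps holds exactly the DFS leaves, in DFS order
theorem pvIter_eq (n : Nat) : ∀ (f : List (List (List Int) × List Int)),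
    (pvIter n f).map Prod.snd = f.flatMap (fun p => pvDfs n p.1 p.2) := by
  induction n with
  | zero =>
    intro f
    simp only [pvIter, pvDfs]
    exact List.map_eq_flatMap
  | succ n ih =>
    intro f
    show (pvIter n (pvStep f)).map Prod.snd = _
    rw [ih, pvStep, List.flatMap_assoc]
    congr 1
    funext p
    simp [List.flatMap_def, pvDfs, pvWithout, Function.comp_def]

-- count beyond the number of cards: no arrangement exists
theorem pvDfs_nil (n : Nat) : ∀ (cards : List (List Int)) (duizi : List Int),
    cards.length < n → pvDfs n cards duizi = [] := by
  induction n with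
  | zero => intro cards duizi h; omega
  | succ n ih =>
    intro cards duizi h
    simp only [pvDfs, List.flatMap_eq_nil_iff]
    intro i hi
    have hpos : 0 < cards.length := List.length_pos_of_mem hi
    exact ih _ _ (by have := List.length_erase_of_mem hi; omega)

-- ===== VERDICT (by name: the statement is the Claim_ definition above) =====
theorem dui_zi_arrangement_spec : Claim_equal_dui_zi_arrangement := by
  intro cards count duizi duizis _ _
  show dui_zi_arrangement cards count duizi duizis = dui_zi_arrangement_alt cards count duizi duizis
  unfold dui_zi_arrangement dui_zi_arrangement_alt
  by_cases hneg : count < 0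
  · rw [pvDfsA_neg _ _ _ _ _ hneg, if_neg (by omega)]
  · rw [pvDfsA_eq _ _ _ _ _ (by omega) (by omega)]
    by_cases hle : count ≤ (cards.length : Int)
    · rw [if_pos ⟨by omega, hle⟩, pvIter_eq]
      simp
    · rw [if_neg (by tauto), pvDfs_nil _ _ _ (by omega), List.append_nil]
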